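-- pv_equiv track=rewrite | github.com/sdarmon/stage-M2 | scr/expressed_TE.py | homomorphic_compression
-- ===== SOURCE A (Python) =====
-- def homomorphic_compression(read,w):
--     #Removing consecutive duplicates window by window
--     S = read[0:w]
--     current_w = read[0:w]
--     for i in range(1, len(read)-w):
--         next_w = read[i:i+w]
--         if current_w != next_w:
--             S += read[i+w-1]
--             current_w = next_w
--     return S
-- ===== SOURCE B (Python) =====
-- def homomorphic_compression(read, w):
--     # One pass, O(1) work per position: consecutive windows read[i-1:i-1+w] and
--     # read[i:i+w] are equal iff read[i-1..i+w-1] is constant, i.e. iff the last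
--     # position j with read[j] != read[j-1] is < i.  Track that position instead
--     # of comparing w-character windows.
--     out = list(read[:w])
--     last = 0  # most recent j with read[j] != read[j-1] seen so far (0 = none yet)
--     for j in range(1, len(read) - 1):
--         if read[j] != read[j - 1]:
--             last = j
--         if j >= w and last >= j - w + 1:
--             out.append(read[j])
--     return "".join(out)
-- ===== Notes on version B (the rewrite author's own statement) =====
-- stated objective: faster
-- what changed: Replaces A's per-position comparison of two w-character windows with a single pass that tracks the last index where adjacent characters differ (two consecutive windows are equal iff that index falls before the window), so each position costs O(1) instead of O(w).
-- outside the precondition, e.g. on homomorphic_compression('abc', -1): A returns 'abc', B returns 'ab'; on homomorphic_compression('abcd', -2): A returns 'abcd', B returns 'ab'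
import Mathlib
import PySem

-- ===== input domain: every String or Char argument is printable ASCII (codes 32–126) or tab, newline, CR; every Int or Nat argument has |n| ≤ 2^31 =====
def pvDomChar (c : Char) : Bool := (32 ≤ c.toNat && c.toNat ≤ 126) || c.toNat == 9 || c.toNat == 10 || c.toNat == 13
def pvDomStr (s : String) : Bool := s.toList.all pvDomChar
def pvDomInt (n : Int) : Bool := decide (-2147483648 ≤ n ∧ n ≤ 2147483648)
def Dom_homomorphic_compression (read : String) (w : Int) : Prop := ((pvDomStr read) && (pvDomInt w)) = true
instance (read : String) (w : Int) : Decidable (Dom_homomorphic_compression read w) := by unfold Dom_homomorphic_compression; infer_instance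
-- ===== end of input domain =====

-- B replaces A's per-position w-character window comparison by a single pass that
-- tracks the last index where adjacent characters differ.

-- ===== PORT A =====
-- A: S = read[0:w]; current_w = read[0:w]; for i in range(1, len(read)-w):
--      next_w = read[i:i+w]; if current_w != next_w: S += read[i+w-1]; current_w = next_w
-- (read[i+w-1] is ported with pyGet?; it is `some` on every index A reaches inside Pre_)
def homomorphic_compression (read : String) (w : Int) : String :=
  let cs := read.toList
  let S := PySem.List.slice cs (some 0) (some w)
  let current := PySem.List.slice cs (some 0) (some w)
  let st := (PySem.List.pyRange 1 ((cs.length : Int) - w) 1).foldl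
    (fun (st : List Char × List Char) i =>
      let next := PySem.List.slice cs (some i) (some (i + w))
      if st.2 ≠ next then
        (st.1 ++ (PySem.List.pyGet? cs (i + w - 1)).elim [] (fun c => [c]), next)
      else st)
    (S, current)
  String.ofList st.1

-- ===== PORT B =====
-- B: out = list(read[:w]); last = 0
--    for j in range(1, len(read)-1):
--        if read[j] != read[j-1]: last = j
--        if j >= w and last >= j - w + 1: out.append(read[j])
--    return "".join(out)
-- (read[j] / read[j-1] are always in range for 1 ≤ j ≤ len-2, so pyGetD is exact here)
def homomorphic_compression_alt (read : String) (w : Int) : String :=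
  let cs := read.toList
  let st := (PySem.List.pyRange 1 ((cs.length : Int) - 1) 1).foldl
    (fun (st : List Char × Int) j =>
      let last := if PySem.List.pyGetD cs j ' ' ≠ PySem.List.pyGetD cs (j - 1) ' ' then j else st.2
      let out := if w ≤ j ∧ j - w + 1 ≤ last then st.1 ++ [PySem.List.pyGetD cs j ' '] else st.1
      (out, last))
    (PySem.List.slice cs (some 0) (some w), 0)
  String.ofList st.1

-- ===== PRECONDITION & SPEC =====
-- Pre_ excludes negative w, outside the natural domain (a window size), where A's value
-- is an accident of Python's negative slice/index wraparound (a prefix extended via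
-- read[i+w-1] with a negative index) and A's loop runs for len(read)-w iterations.
def Pre_homomorphic_compression (read : String) (w : Int) : Prop := 0 ≤ w
instance (read : String) (w : Int) : Decidable (Pre_homomorphic_compression read w) := by unfold Pre_homomorphic_compression; infer_instance
def pvWitness_homomorphic_compression : String × Int := ("abca", 2)
def Spec_homomorphic_compression (read : String) (w : Int) (out : String) : Prop := out = homomorphic_compression_alt read w
instance (read : String) (w : Int) (out : String) : Decidable (Spec_homomorphic_compression read w out) := by unfold Spec_homomorphic_compression; infer_instance

-- ===== CLAIM (what is proved, stated in full; the proofs are below) =====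
def Claim_equal_homomorphic_compression : Prop := ∀ (read : String) (w : Int), Dom_homomorphic_compression read w → Pre_homomorphic_compression read w → Spec_homomorphic_compression read w (homomorphic_compression read w)

-- ===== LEMMAS AND PROOFS =====

-- window starting at t of width W
def pvWin (cs : List Char) (W t : Nat) : List Char := (cs.drop t).take W

-- last adjacent-mismatch position ≤ j (0 if none); the pure value of B's `last`
def pvL (cs : List Char) : Nat → Int
  | 0 => 0
  | j + 1 => if cs.getD (j + 1) ' ' ≠ cs.getD j ' ' then ((j + 1 : Nat) : Int) else pvL cs j

-- A's appended characters, as a function of how many loop iterations ran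
def pvE (cs : List Char) (W : Nat) (k : Nat) : List Char :=
  (List.range k).flatMap (fun t =>
    if pvWin cs W t ≠ pvWin cs W (t + 1) then
      (PySem.List.pyGet? cs (((t + 1 : Nat) : Int) + (W : Int) - 1)).elim [] (fun c => [c])
    else [])

-- B's appended characters
def pvF (cs : List Char) (w : Int) (k : Nat) : List Char :=
  (List.range k).flatMap (fun t =>
    if w ≤ ((t + 1 : Nat) : Int) ∧ ((t + 1 : Nat) : Int) - w + 1 ≤ pvL cs (t + 1) then
      [cs.getD (t + 1) ' ']
    else [])

theorem pvL_bounds (cs : List Char) (j : Nat) : 0 ≤ pvL cs j ∧ pvL cs j ≤ (j : Int) := by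
  induction j with
  | zero => simp [pvL]
  | succ j ih =>
      simp only [pvL]
      split <;> omega

theorem pvL_charact (cs : List Char) (i j : Nat) (hi : 1 ≤ i) :
    ((i : Int) ≤ pvL cs j) ↔ ∃ u, i ≤ u ∧ u ≤ j ∧ cs.getD u ' ' ≠ cs.getD (u - 1) ' ' := by
  induction j with
  | zero =>
      simp only [pvL]
      constructor
      · intro h; omega
      · rintro ⟨u, h1, h2, _⟩; omega
  | succ j ih =>
      simp only [pvL]
      split
      next h =>
        constructor
        · intro hle
          exact ⟨j + 1, by exact_mod_cast hle, le_refl _, by simpa using h⟩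
        · rintro ⟨u, h1, h2, _⟩
          have : i ≤ j + 1 := le_trans h1 h2
          exact_mod_cast Int.ofNat_le.mpr this
      next h =>
        rw [ih]
        constructor
        · rintro ⟨u, h1, h2, hm⟩; exact ⟨u, h1, Nat.le_succ_of_le h2, hm⟩
        · rintro ⟨u, h1, h2, hm⟩
          refine ⟨u, h1, ?_, hm⟩
          rcases Nat.lt_or_ge u (j + 1) with h' | h'
          · omega
          · have : u = j + 1 := by omega
            subst this
            simp only [Nat.add_sub_cancel] at hm
            exact absurd hm h

-- A's loop invariant
theorem pvA_inv (cs : List Char) (w : Int) (hw : 0 ≤ w) (k : Nat) (S0 : List Char) :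
    (PySem.List.pyRange 1 (1 + (k : Int)) 1).foldl
      (fun (st : List Char × List Char) i =>
        let next := PySem.List.slice cs (some i) (some (i + w))
        if st.2 ≠ next then
          (st.1 ++ (PySem.List.pyGet? cs (i + w - 1)).elim [] (fun c => [c]), next)
        else st)
      (S0, pvWin cs w.toNat 0)
    = (S0 ++ pvE cs w.toNat k, pvWin cs w.toNat k) := by
  have hwW : (w.toNat : Int) = w := Int.toNat_of_nonneg hw
  induction k with
  | zero =>
      have h0 : PySem.List.pyRange 1 (1 + ((0 : Nat) : Int)) 1 = [] := by decide
      simp only [h0, List.foldl_nil, pvE, List.range_zero, List.flatMap_nil, List.append_nil, pvWin]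
  | succ k ih =>
      have h1 : (1 + ((k + 1 : Nat) : Int)) = (1 + (k : Int)) + 1 := by push_cast; ring
      rw [h1, PySem.List.pyRange_one_succ_right (by omega), List.foldl_append, ih]
      simp only [List.foldl_cons, List.foldl_nil]
      have e1 : PySem.List.slice cs (some (1 + (k : Int))) (some (1 + (k : Int) + w))
          = pvWin cs w.toNat (k + 1) := by
        rw [show (1 + (k : Int) + w) = ((k + 1 : Nat) : Int) + (w.toNat : Int) by omega,
            show (1 + (k : Int)) = ((k + 1 : Nat) : Int) by omega]
        exact PySem.List.slice_natCast_add cs (k + 1) w.toNat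
      have e2 : (1 + (k : Int) + w - 1) = ((k + 1 : Nat) : Int) + (w.toNat : Int) - 1 := by omega
      have e3 : pvE cs w.toNat (k + 1) = pvE cs w.toNat k ++
          (if pvWin cs w.toNat k ≠ pvWin cs w.toNat (k + 1) then
            (PySem.List.pyGet? cs (((k + 1 : Nat) : Int) + (w.toNat : Int) - 1)).elim [] (fun c => [c])
          else []) := by
        simp [pvE, List.range_succ]
      simp only [e1, e2, e3]
      split
      next h => simp [List.append_assoc]
      next h =>
        have heq : pvWin cs w.toNat k = pvWin cs w.toNat (k + 1) := not_not.mp (by simpa using h)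
        simp [heq]

-- B's loop invariant
theorem pvB_inv (cs : List Char) (w : Int) (k : Nat) (S0 : List Char) :
    (PySem.List.pyRange 1 (1 + (k : Int)) 1).foldl
      (fun (st : List Char × Int) j =>
        let last := if PySem.List.pyGetD cs j ' ' ≠ PySem.List.pyGetD cs (j - 1) ' ' then j else st.2
        let out := if w ≤ j ∧ j - w + 1 ≤ last then st.1 ++ [PySem.List.pyGetD cs j ' '] else st.1
        (out, last))
      (S0, 0)
    = (S0 ++ pvF cs w k, pvL cs k) := by
  induction k with
  | zero =>
      have h0 : PySem.List.pyRange 1 (1 + ((0 : Nat) : Int)) 1 = [] := by decide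
      simp only [h0, List.foldl_nil, pvF, pvL, List.range_zero, List.flatMap_nil, List.append_nil]
  | succ k ih =>
      have h1 : (1 + ((k + 1 : Nat) : Int)) = (1 + (k : Int)) + 1 := by push_cast; ring
      rw [h1, PySem.List.pyRange_one_succ_right (by omega), List.foldl_append, ih]
      simp only [List.foldl_cons, List.foldl_nil]
      rw [show (1 + (k : Int)) = ((k + 1 : Nat) : Int) from by omega]
      have g1 : PySem.List.pyGetD cs ((k + 1 : Nat) : Int) ' ' = cs.getD (k + 1) ' ' := by
        rw [PySem.List.pyGetD_natCast]
      have g2 : PySem.List.pyGetD cs (((k + 1 : Nat) : Int) - 1) ' ' = cs.getD k ' ' := by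
        rw [show (((k + 1 : Nat) : Int) - 1) = ((k : Nat) : Int) from by omega, PySem.List.pyGetD_natCast]
      rw [g1, g2]
      have l1 : (if cs.getD (k + 1) ' ' ≠ cs.getD k ' ' then ((k + 1 : Nat) : Int) else pvL cs k)
          = pvL cs (k + 1) := by
        simp only [pvL]
      rw [l1]
      have f1 : pvF cs w (k + 1) = pvF cs w k ++
          (if w ≤ ((k + 1 : Nat) : Int) ∧ ((k + 1 : Nat) : Int) - w + 1 ≤ pvL cs (k + 1) then
            [cs.getD (k + 1) ' '] else []) := by
        simp only [pvF, List.range_succ, List.flatMap_append, List.flatMap_cons, List.flatMap_nil,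
          List.append_nil]
      rw [f1]
      by_cases hc2 : w ≤ ((k + 1 : Nat) : Int) ∧ ((k + 1 : Nat) : Int) - w + 1 ≤ pvL cs (k + 1)
      · rw [if_pos hc2, if_pos hc2, List.append_assoc]
      · rw [if_neg hc2, if_neg hc2, List.append_nil]

theorem pvWin_eq_iff (cs : List Char) (W t : Nat) (h : t + 1 + W ≤ cs.length) :
    pvWin cs W t = pvWin cs W (t + 1) ↔
      ∀ u, t + 1 ≤ u → u ≤ t + W → cs.getD u ' ' = cs.getD (u - 1) ' ' := by
  constructor
  · intro he u h1 h2
    have hv : u - (t + 1) < W := by omega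
    have e := congrArg (fun l => l[u - (t + 1)]?) he
    simp only [pvWin, List.getElem?_take, List.getElem?_drop, if_pos hv] at e
    rw [show t + (u - (t + 1)) = u - 1 from by omega,
        show t + 1 + (u - (t + 1)) = u from by omega] at e
    rw [List.getD_eq_getElem?_getD, List.getD_eq_getElem?_getD, e]
  · intro hall
    apply List.ext_getElem?
    intro v
    by_cases hv : v < W
    · simp only [pvWin, List.getElem?_take, List.getElem?_drop, if_pos hv]
      have h1 : t + v < cs.length := by omega
      have h2 : t + 1 + v < cs.length := by omega
      have := hall (t + 1 + v) (by omega) (by omega)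
      rw [List.getD_eq_getElem?_getD, List.getD_eq_getElem?_getD,
          List.getElem?_eq_getElem h2, show t + 1 + v - 1 = t + v from by omega,
          List.getElem?_eq_getElem h1] at this
      rw [List.getElem?_eq_getElem h1, List.getElem?_eq_getElem h2]
      simpa using this.symm
    · simp only [pvWin, List.getElem?_take, if_neg hv]

theorem pvE_eq_pvF (cs : List Char) (w : Int) (hw : 0 ≤ w) :
    pvE cs w.toNat ((cs.length : Int) - w - 1).toNat = pvF cs w ((cs.length : Int) - 1 - 1).toNat := by
  have hwW : (w.toNat : Int) = w := Int.toNat_of_nonneg hw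
  by_cases hW0 : w.toNat = 0
  · have hA : pvE cs w.toNat ((cs.length : Int) - w - 1).toNat = [] := by
      rw [pvE, List.flatMap_eq_nil_iff]
      intro t _
      rw [if_neg]
      have : pvWin cs w.toNat t = pvWin cs w.toNat (t + 1) := by
        simp [pvWin, hW0]
      simp [this]
    have hB : pvF cs w ((cs.length : Int) - 1 - 1).toNat = [] := by
      rw [pvF, List.flatMap_eq_nil_iff]
      intro t _
      rw [if_neg]
      rintro ⟨-, h2⟩
      have := pvL_bounds cs (t + 1)
      omega
    rw [hA, hB]
  · have hW1 : 1 ≤ w.toNat := Nat.pos_of_ne_zero hW0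
    by_cases hn2 : cs.length < w.toNat + 2
    · have hkA : ((cs.length : Int) - w - 1).toNat = 0 := by omega
      rw [hkA]
      have hA : pvE cs w.toNat 0 = [] := by simp [pvE]
      rw [hA]
      symm
      rw [pvF, List.flatMap_eq_nil_iff]
      intro t ht
      have ht' : t < ((cs.length : Int) - 1 - 1).toNat := List.mem_range.mp ht
      rw [if_neg]
      rintro ⟨h1, -⟩
      omega
    · have hkB : ((cs.length : Int) - 1 - 1).toNat
          = (w.toNat - 1) + ((cs.length : Int) - w - 1).toNat := by omega
      rw [hkB, pvF, List.range_add, List.flatMap_append, List.flatMap_map]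
      have h1 : (List.range (w.toNat - 1)).flatMap (fun t =>
          if w ≤ ((t + 1 : Nat) : Int) ∧ ((t + 1 : Nat) : Int) - w + 1 ≤ pvL cs (t + 1) then
            [cs.getD (t + 1) ' '] else []) = [] := by
        rw [List.flatMap_eq_nil_iff]
        intro t ht
        have ht' : t < w.toNat - 1 := List.mem_range.mp ht
        rw [if_neg]
        rintro ⟨hc, -⟩
        push_cast at hc
        omega
      rw [h1, List.nil_append, pvE, List.flatMap_def, List.flatMap_def]
      refine congrArg List.flatten (List.map_congr_left ?_)
      intro t ht
      have ht' : t < ((cs.length : Int) - w - 1).toNat := List.mem_range.mp ht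
      have harr : t + 1 + w.toNat ≤ cs.length := by omega
      have hj : w.toNat - 1 + t + 1 = w.toNat + t := by omega
      rw [hj]
      have hlt : w.toNat + t < cs.length := by omega
      have hv : (PySem.List.pyGet? cs (((t + 1 : Nat) : Int) + (w.toNat : Int) - 1)).elim []
          (fun c => [c]) = [cs.getD (w.toNat + t) ' '] := by
        rw [show ((t + 1 : Nat) : Int) + (w.toNat : Int) - 1 = ((w.toNat + t : Nat) : Int) from by
              push_cast; ring,
            PySem.List.pyGet?_natCast, List.getElem?_eq_getElem hlt,
            List.getD_eq_getElem?_getD, List.getElem?_eq_getElem hlt]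
        rfl
      have hcond : (pvWin cs w.toNat t ≠ pvWin cs w.toNat (t + 1)) ↔
          (w ≤ ((w.toNat + t : Nat) : Int) ∧
            ((w.toNat + t : Nat) : Int) - w + 1 ≤ pvL cs (w.toNat + t)) := by
      
        have hc1 : w ≤ ((w.toNat + t : Nat) : Int) := by push_cast; omega
        have hc2 : ((w.toNat + t : Nat) : Int) - w + 1 = ((t + 1 : Nat) : Int) := by
          push_cast; omega
        rw [hc2]
        have hch := pvL_charact cs (t + 1) (w.toNat + t) (by omega)
        rw [hch]
        constructor
        · intro hne
          refine ⟨hc1, ?_⟩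
          simp only [ne_eq, pvWin_eq_iff cs w.toNat t harr] at hne
          push_neg at hne
          obtain ⟨u, hu1, hu2, hu3⟩ := hne
          exact ⟨u, hu1, by omega, hu3⟩
        · rintro ⟨-, u, hu1, hu2, hu3⟩
          simp only [ne_eq, pvWin_eq_iff cs w.toNat t harr]
          push_neg
          exact ⟨u, hu1, by omega, hu3⟩
      by_cases hc : pvWin cs w.toNat t ≠ pvWin cs w.toNat (t + 1)
      · rw [if_pos hc, if_pos (hcond.mp hc), hv]
      · rw [if_neg hc, if_neg (fun hx => hc (hcond.mpr hx))]

-- closed form of A's loop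
theorem pvA_closed (cs : List Char) (w : Int) (hw : 0 ≤ w) :
    ((PySem.List.pyRange 1 ((cs.length : Int) - w) 1).foldl
      (fun (st : List Char × List Char) i =>
        let next := PySem.List.slice cs (some i) (some (i + w))
        if st.2 ≠ next then
          (st.1 ++ (PySem.List.pyGet? cs (i + w - 1)).elim [] (fun c => [c]), next)
        else st)
      (PySem.List.slice cs (some 0) (some w), PySem.List.slice cs (some 0) (some w))).1
    = pvWin cs w.toNat 0 ++ pvE cs w.toNat ((cs.length : Int) - w - 1).toNat := by
  have hwW : (w.toNat : Int) = w := Int.toNat_of_nonneg hw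
  have hS : PySem.List.slice cs (some 0) (some w) = pvWin cs w.toNat 0 := by
    rw [PySem.List.slice_toNat cs le_rfl hw]
    simp [pvWin]
  by_cases h : 1 ≤ (cs.length : Int) - w
  · have hk : (cs.length : Int) - w = 1 + ((((cs.length : Int) - w - 1).toNat : Nat) : Int) := by
      omega
    conv_lhs => rw [hk]
    rw [hS, pvA_inv cs w hw _ _]
  · have h0 : PySem.List.pyRange 1 ((cs.length : Int) - w) 1 = [] := by
      rw [List.eq_nil_iff_forall_not_mem]
      intro x hx
      rw [PySem.List.mem_pyRange_one] at hx
      omega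
    have hk0 : ((cs.length : Int) - w - 1).toNat = 0 := by omega
    rw [h0, hk0, List.foldl_nil, hS]
    simp [pvE]

-- closed form of B's loop
theorem pvB_closed (cs : List Char) (w : Int) (hw : 0 ≤ w) :
    ((PySem.List.pyRange 1 ((cs.length : Int) - 1) 1).foldl
      (fun (st : List Char × Int) j =>
        let last := if PySem.List.pyGetD cs j ' ' ≠ PySem.List.pyGetD cs (j - 1) ' ' then j else st.2
        let out := if w ≤ j ∧ j - w + 1 ≤ last then st.1 ++ [PySem.List.pyGetD cs j ' '] else st.1
        (out, last))
      (PySem.List.slice cs (some 0) (some w), 0)).1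
    = pvWin cs w.toNat 0 ++ pvF cs w ((cs.length : Int) - 1 - 1).toNat := by
  have hS : PySem.List.slice cs (some 0) (some w) = pvWin cs w.toNat 0 := by
    rw [PySem.List.slice_toNat cs le_rfl hw]
    simp [pvWin]
  by_cases h : 1 ≤ (cs.length : Int) - 1
  · have hk : (cs.length : Int) - 1 = 1 + ((((cs.length : Int) - 1 - 1).toNat : Nat) : Int) := by
      omega
    conv_lhs => rw [hk]
    rw [hS, pvB_inv cs w _ _]
  · have h0 : PySem.List.pyRange 1 ((cs.length : Int) - 1) 1 = [] := by
      rw [List.eq_nil_iff_forall_not_mem]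
      intro x hx
      rw [PySem.List.mem_pyRange_one] at hx
      omega
    have hk0 : ((cs.length : Int) - 1 - 1).toNat = 0 := by omega
    rw [h0, hk0, List.foldl_nil, hS]
    simp [pvF]

-- ===== VERDICT (by name: the statement is the Claim_ definition above) =====
theorem homomorphic_compression_spec : Claim_equal_homomorphic_compression := by
  intro read w _ hpre
  have hw : 0 ≤ w := hpre
  unfold Spec_homomorphic_compression homomorphic_compression homomorphic_compression_alt
  simp only []
  rw [pvA_closed read.toList w hw, pvB_closed read.toList w hw,
      pvE_eq_pvF read.toList w hw]
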